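-- pv_equiv track=rewrite | github.com/the-deep-nlp/bias-aware-humanitarian-entry-classification | classification/src/models/architectures/multilabel_architecture.py | _get_tag_id_to_layer_id
-- ===== SOURCE A (Python) =====
-- def _get_tag_id_to_layer_id(ids_each_level):
--     tag_id = 0
--     list_id = 0
--     tag_to_list = {}
--     for id_list in ids_each_level:
--         for i in range(len(id_list)):
--             tag_to_list.update({tag_id + i: list_id})
--         tag_id += len(id_list)
--         list_id += 1
--     return tag_to_list
-- ===== SOURCE B (Python) =====
-- def _get_tag_id_to_layer_id(ids_each_level):
--     # Stage 1: cumulative end offsets of each level.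
--     ends = []
--     total = 0
--     for id_list in ids_each_level:
--         total += len(id_list)
--         ends.append(total)
--
--     # Stage 2: the level of a tag id is found by binary search on the offsets
--     # (bisect_right): the first level whose end offset exceeds the tag id.
--     def level_of(i):
--         lo, hi = 0, len(ends)
--         while lo < hi:
--             mid = (lo + hi) // 2
--             if ends[mid] <= i:
--                 lo = mid + 1
--             else:
--                 hi = mid
--         return lo
--
--     return {i: level_of(i) for i in range(total)}
-- ===== Notes on version B (the rewrite author's own statement) =====
-- stated objective: alternative
-- what changed: Instead of one pass with running tag_id/list_id counters inserting each key, B first builds the list of cumulative level end-offsets and then assigns each global tag id its level by binary search (bisect_right) on that offset list.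
import Mathlib
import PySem

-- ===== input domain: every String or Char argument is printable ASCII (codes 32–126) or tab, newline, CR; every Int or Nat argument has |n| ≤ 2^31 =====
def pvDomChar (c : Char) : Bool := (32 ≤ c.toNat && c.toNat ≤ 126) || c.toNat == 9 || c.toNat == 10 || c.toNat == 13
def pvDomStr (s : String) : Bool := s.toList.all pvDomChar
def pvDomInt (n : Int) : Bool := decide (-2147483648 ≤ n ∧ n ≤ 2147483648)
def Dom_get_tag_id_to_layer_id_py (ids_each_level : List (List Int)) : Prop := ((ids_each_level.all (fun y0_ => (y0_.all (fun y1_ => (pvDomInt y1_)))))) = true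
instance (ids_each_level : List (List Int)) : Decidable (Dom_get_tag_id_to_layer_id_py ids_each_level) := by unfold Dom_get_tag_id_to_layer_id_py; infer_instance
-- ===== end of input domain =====

-- B replaces A's single pass with running tag_id/list_id counters by a staged algorithm:
-- build cumulative level end-offsets first, then find each tag's level by binary search
-- (objective: alternative algorithm; same result, not claimed faster).


-- ===== PORT A =====
-- literal port of A: state (tag_id, list_id, tag_to_list); inner loop over range(len(id_list))
-- does tag_to_list.update({tag_id + i: list_id}); then tag_id += len, list_id += 1.
def get_tag_id_to_layer_id_py (ids_each_level : List (List Int)) : List (Int × Int) :=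
  (ids_each_level.foldl
    (fun (st : Int × Int × PySem.Dict Int Int) id_list =>
      (st.1 + id_list.length,
       st.2.1 + 1,
       (PySem.List.pyRange 0 (id_list.length : Int) 1).foldl
         (fun d i => d.insert (st.1 + i) st.2.1) st.2.2))
    (0, 0, PySem.Dict.empty)).2.2.items

-- ===== PORT B =====
-- literal port of B's level_of: the while-loop binary search on the offset list,
-- lo/hi bounds, mid = (lo+hi)//2 — Nat division is exact for Python's // on these nonnegative
-- values (ends[mid] is always in range in B, ported via getD).
def pvLevelOf (ends : List Int) (i : Int) (lo hi : Nat) : Nat :=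
  if h : lo < hi then
    let mid := (lo + hi) / 2
    if ends.getD mid 0 ≤ i then pvLevelOf ends i (mid + 1) hi
    else pvLevelOf ends i lo mid
  else lo
termination_by hi - lo
decreasing_by all_goals omega

-- literal port of B: stage 1 folds (total, ends) over the levels; stage 2 maps each
-- global tag id in range(total) to its binary-searched level.
def get_tag_id_to_layer_id_py_alt (ids_each_level : List (List Int)) : List (Int × Int) :=
  let st : Int × List Int :=
    ids_each_level.foldl
      (fun st id_list => (st.1 + (id_list.length : Int), st.2 ++ [st.1 + (id_list.length : Int)]))
      (0, [])
  (PySem.List.pyRange 0 st.1 1).map (fun i => (i, (pvLevelOf st.2 i 0 st.2.length : Int)))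

-- ===== PRECONDITION & SPEC =====
def Spec_get_tag_id_to_layer_id_py (ids_each_level : List (List Int)) (out : List (Int × Int)) : Prop := out = get_tag_id_to_layer_id_py_alt ids_each_level
instance (ids_each_level : List (List Int)) (out : List (Int × Int)) : Decidable (Spec_get_tag_id_to_layer_id_py ids_each_level out) := by unfold Spec_get_tag_id_to_layer_id_py; infer_instance

-- ===== CLAIM (what is proved, stated in full; the proofs are below) =====
def Claim_equal_get_tag_id_to_layer_id_py : Prop := ∀ (ids_each_level : List (List Int)), Dom_get_tag_id_to_layer_id_py ids_each_level → Spec_get_tag_id_to_layer_id_py ids_each_level (get_tag_id_to_layer_id_py ids_each_level)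

-- ===== LEMMAS AND PROOFS =====

-- common intermediate: the pairs contributed from global offset t onward, levels from l
def pvSpec : List (List Int) → Int → Int → List (Int × Int)
  | [], _, _ => []
  | xs :: rest, t, l =>
      ((List.range xs.length).map (fun (k : Nat) => ((t + (k : Int), l) : Int × Int)))
        ++ pvSpec rest (t + xs.length) (l + 1)

-- the cumulative end offsets starting at offset t
def pvEnds : List (List Int) → Int → List Int
  | [], _ => []
  | xs :: rest, t => (t + xs.length) :: pvEnds rest (t + xs.length)

def pvTotal : List (List Int) → Int
  | [] => 0
  | xs :: rest => (xs.length : Int) + pvTotal rest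

---------------- A side ----------------

lemma innerA (n : Nat) (t l : Int) (d : PySem.Dict Int Int)
    (hd : ∀ k ∈ d.keys, k < t) :
    ((PySem.List.pyRange 0 (n : Int) 1).foldl (fun d i => d.insert (t + i) l) d).items
      = d.items ++ (List.range n).map (fun (k : Nat) => ((t + (k : Int), l) : Int × Int)) := by
  rw [PySem.Dict.items_foldl_insert_fresh]
  · rw [PySem.List.pyRange_one]
    have hn : (((n : Int)) - 0).toNat = n := by omega
    rw [hn, List.map_map]
    congr 1
    refine List.map_congr_left ?_
    intro k _
    simp
  · intro a ha
    rw [PySem.List.mem_pyRange_one] at ha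
    rw [PySem.Dict.contains_eq_decide_mem_keys]
    simp only [decide_eq_false_iff_not]
    intro hk
    have := hd _ hk
    omega
  · rw [PySem.List.pyRange_one]
    simp only [List.map_map]
    rw [Function.comp_def]
    refine List.Nodup.map ?_ (List.nodup_range)
    intro a b h
    simp only [zero_add] at h
    omega

lemma keys_after_inner (n : Nat) (t l : Int) (d : PySem.Dict Int Int)
    (hd : ∀ k ∈ d.keys, k < t) :
    ∀ k ∈ ((PySem.List.pyRange 0 (n : Int) 1).foldl (fun d i => d.insert (t + i) l) d).keys,
      k < t + n := by
  intro k hk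
  have hkeys : ((PySem.List.pyRange 0 (n : Int) 1).foldl (fun d i => d.insert (t + i) l) d).keys
      = (((PySem.List.pyRange 0 (n : Int) 1).foldl (fun d i => d.insert (t + i) l) d).items).map (·.1) := rfl
  rw [hkeys, innerA n t l d hd] at hk
  simp only [List.map_append, List.mem_append, List.map_map] at hk
  rcases hk with hk | hk
  · have h1 := hd k hk
    have h2 : (0 : Int) ≤ (n : Int) := by positivity
    omega
  · simp only [Function.comp_def, List.mem_map, List.mem_range] at hk
    obtain ⟨a, ha, rfl⟩ := hk
    omega


lemma loopA (ids : List (List Int)) (t l : Int) (d : PySem.Dict Int Int)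
    (hd : ∀ k ∈ d.keys, k < t) :
    (ids.foldl
      (fun (st : Int × Int × PySem.Dict Int Int) id_list =>
        (st.1 + id_list.length,
         st.2.1 + 1,
         (PySem.List.pyRange 0 (id_list.length : Int) 1).foldl
           (fun d i => d.insert (st.1 + i) st.2.1) st.2.2))
      (t, l, d)).2.2.items = d.items ++ pvSpec ids t l := by
  induction ids generalizing t l d with
  | nil => simp [pvSpec]
  | cons xs rest ih =>
      simp only [List.foldl_cons]
      rw [ih (t + xs.length) (l + 1) _ (keys_after_inner xs.length t l d hd),
        innerA xs.length t l d hd, pvSpec, List.append_assoc]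

---------------- B side ----------------

lemma ends_foldl (ids : List (List Int)) (t : Int) (acc : List Int) :
    ids.foldl
      (fun (st : Int × List Int) id_list => (st.1 + (id_list.length : Int), st.2 ++ [st.1 + (id_list.length : Int)]))
      (t, acc)
      = (t + pvTotal ids, acc ++ pvEnds ids t) := by
  induction ids generalizing t acc with
  | nil => simp [pvTotal, pvEnds]
  | cons xs rest ih =>
      simp only [List.foldl_cons, ih, pvTotal, pvEnds]
      rw [Prod.mk.injEq]
      exact ⟨by ring, by simp⟩

lemma ends_ge (ids : List (List Int)) (t : Int) : ∀ x ∈ pvEnds ids t, t ≤ x := by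
  induction ids generalizing t with
  | nil => simp [pvEnds]
  | cons xs rest ih =>
      intro x hx
      simp only [pvEnds, List.mem_cons] at hx
      rcases hx with rfl | hx
      · omega
      · have := ih (t + xs.length) x hx
        omega

lemma ends_sorted (ids : List (List Int)) (t : Int) :
    (pvEnds ids t).Pairwise (· ≤ ·) := by
  induction ids generalizing t with
  | nil => simp [pvEnds]
  | cons xs rest ih =>
      refine List.pairwise_cons.mpr ⟨?_, ih _⟩
      intro x hx
      exact ends_ge _ _ x hx

-- count of satisfied elements when satisfaction is exactly 'index < lo'
lemma countP_eq_of_index_split (p : Int → Bool) :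
    ∀ (ends : List Int) (lo : Nat), lo ≤ ends.length →
    (∀ j, j < lo → p (ends.getD j 0) = true) →
    (∀ j, lo ≤ j → j < ends.length → p (ends.getD j 0) = false) →
    ends.countP p = lo := by
  intro ends
  induction ends with
  | nil => intro lo h _ _; simp at h ⊢; omega
  | cons e es ih =>
      intro lo hlo hlt hge
      match lo with
      | 0 =>
          have h0 : p e = false := by simpa using hge 0 (Nat.le_refl 0) (by simp)
          have : es.countP p = 0 := by
            refine ih 0 (Nat.zero_le _) (by intro j hj; omega) ?_
            intro j _ hj
            simpa using hge (j + 1) (Nat.zero_le _) (by simpa using hj)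
          simp [List.countP_cons, h0, this]
      | lo' + 1 =>
          have h0 : p e = true := by simpa using hlt 0 (Nat.succ_pos _)
          have : es.countP p = lo' := by
            refine ih lo' (by simpa using hlo) ?_ ?_
            · intro j hj; simpa using hlt (j + 1) (by omega)
            · intro j hj hjl; simpa using hge (j + 1) (by omega) (by simpa using hjl)
          simp [List.countP_cons, h0, this]

-- binary-search correctness: with the invariant, pvLevelOf computes bisect_right
lemma bs_eq (ends : List Int) (i : Int) (hs : ends.Pairwise (· ≤ ·)) :
    ∀ lo hi, lo ≤ hi → hi ≤ ends.length →
    (∀ j, j < lo → ends.getD j 0 ≤ i) →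
    (∀ j, hi ≤ j → j < ends.length → i < ends.getD j 0) →
    pvLevelOf ends i lo hi = ends.countP (fun e => decide (e ≤ i)) := by
  intro lo hi
  induction lo, hi using pvLevelOf.induct ends i with
  | case1 lo hi h mid hle ih =>
      intro _ hhi hlt hge
      rw [pvLevelOf]
      simp only [h, dif_pos]
      rw [if_pos hle]
      refine ih (by omega) hhi ?_ hge
      intro j hj
      have hm' : mid < ends.length := by omega
      rcases Nat.lt_or_eq_of_le (Nat.lt_succ_iff.mp hj) with h' | h'
      · have hj' : j < ends.length := by omega
        have hpair := (List.pairwise_iff_getElem.mp hs) j mid hj' hm' h'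
        rw [List.getD_eq_getElem ends 0 hj']
        have e2 : ends.getD mid 0 = ends[mid] := List.getD_eq_getElem ends 0 hm'
        rw [e2] at hle
        exact le_trans hpair hle
      · subst h'
        exact hle
  | case2 lo hi h mid hgt ih =>
      intro hlo hhi hlt hge
      rw [pvLevelOf]
      simp only [h, dif_pos]
      rw [if_neg hgt]
      refine ih (by omega) (by omega) hlt ?_
      intro j hj hjl
      rcases Nat.lt_or_ge j hi with hjh | hjh
      · -- mid ≤ j < hi: sortedness gives i < ends[mid] ≤ ends[j]
        have hm' : mid < ends.length := by omega
        rcases Nat.lt_or_eq_of_le hj with h' | h'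
        · have hpair := (List.pairwise_iff_getElem.mp hs) mid j hm' hjl h'
          rw [List.getD_eq_getElem ends 0 hjl]
          have e2 : ends.getD mid 0 = ends[mid] := List.getD_eq_getElem ends 0 hm'
          rw [e2] at hgt
          omega
        · rw [← h']; omega
      · exact hge j hjh hjl
  | case3 lo hi h =>
      intro hlo hhi hlt hge
      rw [pvLevelOf]
      rw [dif_neg h]
      have : lo = hi := by omega
      subst this
      exact (countP_eq_of_index_split _ ends lo hhi
        (fun j hj => by simpa using hlt j hj)
        (fun j hj hjl => by simpa using hge j hj hjl)).symm

-- every element of pvEnds rest s is ≥ s (restated for use below through countP)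
lemma countP_ends_lt (rest : List (List Int)) (s i : Int) (hi : i < s) :
    (pvEnds rest s).countP (fun e => decide (e ≤ i)) = 0 := by
  rw [List.countP_eq_zero]
  intro e he
  have := ends_ge rest s e he
  simp; omega

-- the spec list is exactly the range mapped through bisect_right on the offsets
lemma spec_eq_map (ids : List (List Int)) (t l : Int) :
    pvSpec ids t l
      = (PySem.List.pyRange t (t + pvTotal ids) 1).map
          (fun i => (i, l + ((pvEnds ids t).countP (fun e => decide (e ≤ i)) : Int))) := by
  induction ids generalizing t l with
  | nil => simp [pvSpec, pvTotal, PySem.List.pyRange_one_eq_nil]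
  | cons xs rest ih =>
      have htot : (0 : Int) ≤ pvTotal rest := by
        clear ih
        induction rest with
        | nil => simp [pvTotal]
        | cons ys r ihr => simp only [pvTotal]; positivity
      rw [pvSpec, ih,
        PySem.List.pyRange_one_append t (t + xs.length) (t + pvTotal (xs :: rest))
          (by omega) (by simp only [pvTotal]; omega),
        List.map_append]
      congr 1
      · -- first block: indices t..t+|xs|-1 all get level l
        have hm : ((t + (xs.length : Int)) - t).toNat = xs.length := by omega
        rw [PySem.List.pyRange_one, hm, List.map_map]
        refine List.map_congr_left ?_
        intro k hk
        simp only [List.mem_range] at hk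
        simp only [Function.comp_apply, Prod.mk.injEq, true_and]
        have h1 : ¬ ((t + (xs.length : Int)) ≤ t + k) := by omega
        have h2 : (pvEnds rest (t + xs.length)).countP (fun e => decide (e ≤ t + (k : Int))) = 0 :=
          countP_ends_lt rest _ _ (by omega)
        simp only [pvEnds, List.countP_cons, h2, decide_eq_true_eq]
        rw [if_neg h1]
        simp
      · -- tail block: head offset is ≤ every index there, contributing 1
        have : t + pvTotal (xs :: rest) = (t + xs.length) + pvTotal rest := by
          simp only [pvTotal]; ring
        rw [this]
        refine List.map_congr_left ?_
        intro i hi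
        rw [PySem.List.mem_pyRange_one] at hi
        have h1 : ((t + (xs.length : Int)) ≤ i) := hi.1
        simp only [pvEnds, List.countP_cons, decide_eq_true_eq]
        rw [if_pos h1]
        push_cast
        ring_nf

-- ===== VERDICT (by name: the statement is the Claim_ definition above) =====
theorem get_tag_id_to_layer_id_py_spec : Claim_equal_get_tag_id_to_layer_id_py := by
  intro ids _
  unfold Spec_get_tag_id_to_layer_id_py get_tag_id_to_layer_id_py get_tag_id_to_layer_id_py_alt
  rw [loopA ids 0 0 PySem.Dict.empty (by simp [PySem.Dict.keys_empty])]
  rw [ends_foldl ids 0 []]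
  simp only [List.nil_append, zero_add]
  rw [spec_eq_map ids 0 0]
  simp only [PySem.Dict.empty, zero_add, List.nil_append]
  refine List.map_congr_left ?_
  intro i _
  rw [bs_eq (pvEnds ids 0) i (ends_sorted ids 0) 0 (pvEnds ids 0).length
      (Nat.zero_le _) (Nat.le_refl _) (by intro j hj; omega) (by intro j hj hjl; omega)]
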